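-- pv_equiv track=rewrite | github.com/career-prep/ucp-namer-latam-2026 | homework3/sam_strugger_3/q5_FirstKBinaryNumbers.py | binaryNumbers2
-- ===== SOURCE A (Python) =====
-- from collections import deque
--
-- def binaryNumbers2(k):
--     result = ["0"]
--
--     queue = deque()
--     queue.append("1")
--
--     for i in range(1,k):
--         top = queue.popleft()
--         result.append(top)
--
--         queue.append(top+"0")
--         queue.append(top+"1")
--
--     return result
-- ===== SOURCE B (Python) =====
-- def binaryNumbers2(k):
--     result = ["0"]
--     for i in range(1, k):
--         result.append(bin(i)[2:])
--     return result
-- ===== Notes on version B (the rewrite author's own statement) =====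
-- stated objective: simpler
-- what changed: Replaces the BFS deque that derives each string by appending '0'/'1' to a dequeued predecessor with a direct per-index binary conversion bin(i)[2:], eliminating the queue entirely.
import Mathlib
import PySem

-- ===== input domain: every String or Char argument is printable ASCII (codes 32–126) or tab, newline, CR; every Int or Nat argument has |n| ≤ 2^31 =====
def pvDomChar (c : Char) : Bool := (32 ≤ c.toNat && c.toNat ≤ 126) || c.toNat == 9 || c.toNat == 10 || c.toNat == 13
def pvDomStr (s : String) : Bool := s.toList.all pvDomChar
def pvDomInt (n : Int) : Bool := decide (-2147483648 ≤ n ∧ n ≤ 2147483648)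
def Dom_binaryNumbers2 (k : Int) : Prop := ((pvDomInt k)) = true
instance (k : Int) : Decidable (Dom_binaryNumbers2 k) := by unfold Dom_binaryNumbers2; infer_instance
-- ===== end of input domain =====

-- B replaces A's BFS deque (each string built from a dequeued predecessor) with a direct
-- per-index binary conversion bin(i)[2:]; objective: simpler.

-- ===== PORT A =====
-- strings are carried as List Char internally (Python '+' on str = List.append); String.mk at the end.
-- loop 'for i in range(1,k)': (k-1).toNat iterations; popleft on the deque is the head
-- (the deque is never empty in Python — it starts with one element and gains two per pop —
-- so the [] branch below is unreachable).
def pvLoopA : Nat → List (List Char) → List (List Char) → List (List Char)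
  | 0, result, _ => result
  | n+1, result, queue =>
    match queue with
    | [] => result
    | top :: rest => pvLoopA n (result ++ [top]) (rest ++ [top ++ ['0'], top ++ ['1']])

def binaryNumbers2 (k : Int) : List String :=
  (pvLoopA (k - 1).toNat [['0']] [['1']]).map String.mk

-- ===== PORT B =====
-- hand port of Python's bin(i)[2:] for i ≥ 1 (exact there: most significant digit first,
-- no leading zeros); it is also applied only to i ≥ 1 below.
def pvBin (n : Nat) : List Char :=
  if n < 2 then [if n = 0 then '0' else '1']
  else pvBin (n / 2) ++ [if n % 2 = 0 then '0' else '1']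
decreasing_by exact Nat.div_lt_self (by omega) (by omega)

def binaryNumbers2_alt (k : Int) : List String :=
  (PySem.List.pyRange 1 k 1).foldl (fun res i => res ++ [String.mk (pvBin i.toNat)]) ["0"]

-- ===== PRECONDITION & SPEC =====
def Spec_binaryNumbers2 (k : Int) (out : List String) : Prop := out = binaryNumbers2_alt k
instance (k : Int) (out : List String) : Decidable (Spec_binaryNumbers2 k out) := by unfold Spec_binaryNumbers2; infer_instance

-- ===== CLAIM (what is proved, stated in full; the proofs are below) =====
def Claim_equal_binaryNumbers2 : Prop := ∀ (k : Int), Dom_binaryNumbers2 k → Spec_binaryNumbers2 k (binaryNumbers2 k)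

-- ===== LEMMAS AND PROOFS =====

theorem pvBin_two_mul (j : Nat) (hj : 1 ≤ j) : pvBin (2 * j) = pvBin j ++ ['0'] := by
  rw [pvBin]
  have h1 : ¬ 2 * j < 2 := by omega
  have h2 : 2 * j / 2 = j := by omega
  have h3 : 2 * j % 2 = 0 := by omega
  simp [h1, h2, h3]

theorem pvBin_two_mul_add_one (j : Nat) (hj : 1 ≤ j) :
    pvBin (2 * j + 1) = pvBin j ++ ['1'] := by
  rw [pvBin]
  have h1 : ¬ 2 * j + 1 < 2 := by omega
  have h2 : (2 * j + 1) / 2 = j := by omega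
  have h3 : (2 * j + 1) % 2 = 1 := by omega
  simp [h1, h2, h3]

-- BFS invariant: before each iteration with next index j (j ≥ 1), the deque holds exactly
-- the binary strings of j, j+1, …, 2j-1; running n more iterations appends bin(j)…bin(j+n-1).
theorem pvLoopA_invariant (n : Nat) : ∀ (j : Nat) (result : List (List Char)), 1 ≤ j →
    pvLoopA n result ((List.range' j j).map pvBin)
      = result ++ (List.range' j n).map pvBin := by
  induction n with
  | zero => intro j result hj; simp [pvLoopA]
  | succ n ih =>
    intro j result hj
    obtain ⟨m, rfl⟩ : ∃ m, j = m + 1 := ⟨j - 1, by omega⟩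
    rw [List.range'_succ, List.map_cons, pvLoopA]
    have hq : (List.range' (m + 1 + 1) m).map pvBin
        ++ [pvBin (m + 1) ++ ['0'], pvBin (m + 1) ++ ['1']]
        = (List.range' (m + 1 + 1) (m + 1 + 1)).map pvBin := by
      rw [List.range'_concat, List.range'_concat]
      rw [← pvBin_two_mul (m + 1) (by omega), ← pvBin_two_mul_add_one (m + 1) (by omega)]
      have e1 : m + 1 + 1 + m = 2 * (m + 1) := by omega
      have e2 : m + 1 + 1 + (m + 1) = 2 * (m + 1) + 1 := by omega
      simp [e1, e2]
    rw [hq, ih (m + 1 + 1) (result ++ [pvBin (m + 1)]) (by omega)]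
    rw [List.range'_succ, List.map_cons]
    simp

theorem pvFoldl_append_map {α β : Type} (f : α → β) (l : List α) (acc : List β) :
    l.foldl (fun res i => res ++ [f i]) acc = acc ++ l.map f := by
  induction l generalizing acc with
  | nil => simp
  | cons x xs ih => simp [List.foldl_cons, ih, List.append_assoc]

-- ===== VERDICT (by name: the statement is the Claim_ definition above) =====
theorem binaryNumbers2_spec : Claim_equal_binaryNumbers2 := by
  intro k _
  unfold Spec_binaryNumbers2 binaryNumbers2 binaryNumbers2_alt
  rw [pvFoldl_append_map, PySem.List.pyRange_one]
  have hb1 : pvBin 1 = ['1'] := by rw [pvBin]; simp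
  have h1 : [['1']] = (List.range' 1 1).map pvBin := by simp [hb1]
  rw [h1, pvLoopA_invariant (k - 1).toNat 1 [['0']] (by omega)]
  rw [List.range'_eq_map_range]
  simp only [List.map_map, List.map_cons, List.map_append]
  simp [Function.comp_def]
  exact ⟨rfl, fun a _ => by congr 2⟩
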